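-- pv_equiv track=rewrite | github.com/letgodchan0/Programmers | solution/인사고과.py | solution
-- ===== SOURCE A (Python) =====
-- def solution(scores):
--     check, answer, wanho = 0, 1, scores[0]
--     scores.sort(key=lambda x : (-x[0], x[1]))
--
--     for a, b in scores:
--         if wanho[0] < a and wanho[1] < b:
--             return -1
--         if check <= b:
--             if a + b > sum(wanho):
--                 answer += 1
--             check = b
--
--     return answer
-- ===== SOURCE B (Python) =====
-- # B: sort-free re-implementation. A sorts `scores` in place; B does not mutate its
-- # argument (the equivalence proved is about the return value only).
-- # Intended difference (D_): A's running max starts at 0, so it skips Pareto-optimal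
-- # rows whose second score is negative; B counts every non-dominated row that beats
-- # scores[0]'s total, which is the intended rank.
-- def solution(scores):
--     a0, b0 = scores[0]
--     if any(a > a0 and b > b0 for a, b in scores):
--         return -1
--     total = a0 + b0
--     return 1 + sum(1 for a, b in scores
--                    if a + b > total
--                    and not any(x > a and y > b for x, y in scores))
-- ===== Notes on version B (the rewrite author's own statement) =====
-- stated objective: alternative
-- what changed: A sorts by (-a, b) and runs one intertwined sweep with a running max and early -1 return; B does no sorting at all: it checks domination of scores[0] by one scan and counts rows that beat scores[0]'s total and are strictly dominated by no row, via direct pairwise scans (B also does not mutate its argument, while A sorts it in place).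
-- intended difference: On inputs whose first row is undominated but where some Pareto-undominated row with a negative second score beats the first row's total, A returns a too-small rank because its running max is initialised to 0 and skips such rows, while B counts them, which is the intended rank (at the witness [[5,5],[20,-1]] A returns 1, B returns 2). — e.g. on solution([[5, 5], [20, -1]]): A returns 1, B returns 2
-- outside the precondition, e.g. on solution([]): A raises IndexError, B raises IndexError; on solution([[1, 1], [1, 2, 3], [5, 5]]): A returns -1, B raises ValueError
import Mathlib
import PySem

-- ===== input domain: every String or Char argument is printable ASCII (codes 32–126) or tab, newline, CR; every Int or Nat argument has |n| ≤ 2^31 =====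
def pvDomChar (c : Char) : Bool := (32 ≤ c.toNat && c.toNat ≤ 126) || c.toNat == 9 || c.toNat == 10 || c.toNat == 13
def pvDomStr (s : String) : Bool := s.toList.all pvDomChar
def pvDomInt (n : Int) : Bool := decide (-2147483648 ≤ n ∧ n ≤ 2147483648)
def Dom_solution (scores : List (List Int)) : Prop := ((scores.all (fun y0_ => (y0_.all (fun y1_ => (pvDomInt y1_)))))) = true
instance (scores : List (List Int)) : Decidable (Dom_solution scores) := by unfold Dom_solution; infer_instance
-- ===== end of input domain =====

-- B drops A's sort entirely and counts Pareto-undominated rows by direct pairwise scans;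
-- A sorts `scores` in place while B leaves it untouched — the equivalence proved is about the
-- return value only.  On rows with a negative second score A's 0-initialised running max
-- skips Pareto-optimal rows; B counts them (intended difference, see D_solution).


-- ===== PORT A =====
-- the for-loop of A, state (check, answer); a row that is not a two-element list makes
-- Python's 'for a, b in scores' raise there (such inputs are excluded by Pre_solution)
def solGoA (w0 w1 s : Int) : Int → Int → List (List Int) → Int
  | _, answer, [] => answer
  | check, answer, [a, b] :: rest =>
      if w0 < a ∧ w1 < b then -1
      else if check ≤ b then
        solGoA w0 w1 s b (if a + b > s then answer + 1 else answer) rest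
      else solGoA w0 w1 s check answer rest
  | _, _, _ :: _ => 0

def solution (scores : List (List Int)) : Int :=
  match scores with
  | [] => 0      -- scores[0] raises IndexError (excluded by Pre_solution)
  | wanho :: _ =>
    solGoA (PySem.List.pyGetD wanho 0 0) (PySem.List.pyGetD wanho 1 0) wanho.sum 0 1
      (PySem.List.sorted2 scores (fun x => -(PySem.List.pyGetD x 0 0)) (fun x => PySem.List.pyGetD x 1 0))

-- ===== PORT B =====
-- 'any(x > a and y > b for x, y in scores)': is (a, b) strictly dominated by some row?
def domInAlt (scores : List (List Int)) (a b : Int) : Bool :=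
  scores.any (fun r => match r with
    | [x, y] => decide (a < x) && decide (b < y)
    | _ => false)      -- unpacking 'x, y' raises there (excluded by Pre_solution)

def solution_alt (scores : List (List Int)) : Int :=
  match scores with
  | [a0, b0] :: _ =>
    if domInAlt scores a0 b0 then -1
    else
      1 + (scores.countP (fun r => match r with
            | [a, b] => decide (a + b > a0 + b0) && !(domInAlt scores a b)
            | _ => false) : Int)
  | _ => 0      -- 'a0, b0 = scores[0]' raises there (excluded by Pre_solution)

-- ===== PRECONDITION & SPEC =====
-- Pre_ restricts to the natural domain: a nonempty list of (score, score) pairs.  On [] and on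
-- rows that are not two-element lists Python raises (though A can return -1 before reaching a
-- malformed row when an earlier row in its sorted order dominates scores[0] — see cites).
def Pre_solution (scores : List (List Int)) : Prop :=
  scores ≠ [] ∧ ∀ r ∈ scores, r.length = 2
instance (scores : List (List Int)) : Decidable (Pre_solution scores) := by unfold Pre_solution; infer_instance
def pvWitness_solution : List (List Int) := [[5, 5], [3, 4]]

-- Inputs whose first row is undominated but where some Pareto-undominated row with a NEGATIVE
-- second score beats the first row's total: A's running max starts at 0 so it skips such rows
-- and returns a too-small rank, while B counts them, which is the intended rank.
-- is row r strictly dominated by no row of scores?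
def pvUndom (scores : List (List Int)) (r : List Int) : Bool :=
  scores.all fun q => !(decide (r.getD 0 0 < q.getD 0 0) && decide (r.getD 1 0 < q.getD 1 0))

def D_solution (scores : List (List Int)) : Prop :=
  pvUndom scores (scores.headD []) = true ∧
  ∃ r ∈ scores, r.getD 1 0 < 0 ∧ (scores.headD []).sum < r.sum ∧ pvUndom scores r = true
instance (scores : List (List Int)) : Decidable (D_solution scores) := by unfold D_solution; infer_instance

def Spec_solution (scores : List (List Int)) (out : Int) : Prop :=
  ¬ D_solution scores → out = solution_alt scores
instance (scores : List (List Int)) (out : Int) : Decidable (Spec_solution scores out) := by unfold Spec_solution; infer_instance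

def pvDiffWitness_solution : List (List Int) := [[5, 5], [20, -1]]
def pvDiffWitnessOut_solution : Int × Int := (1, 2)

-- ===== CLAIM (what is proved, stated in full; the proofs are below) =====
def Claim_unchanged_solution : Prop := ∀ (scores : List (List Int)), Dom_solution scores → Pre_solution scores → Spec_solution scores (solution scores)
def Claim_changed_solution : Prop := Dom_solution (pvDiffWitness_solution) ∧ Pre_solution (pvDiffWitness_solution) ∧ D_solution (pvDiffWitness_solution) ∧ solution (pvDiffWitness_solution) = pvDiffWitnessOut_solution.1 ∧ solution_alt (pvDiffWitness_solution) = pvDiffWitnessOut_solution.2 ∧ pvDiffWitnessOut_solution.1 ≠ pvDiffWitnessOut_solution.2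
def Claim_exact_solution : Prop := ∀ (scores : List (List Int)), Dom_solution scores → Pre_solution scores → D_solution scores → solution scores ≠ solution_alt scores

-- ===== LEMMAS AND PROOFS =====

-- first / second entry of a row
def fA (r : List Int) : Int := r.getD 0 0
def fB (r : List Int) : Int := r.getD 1 0
@[simp] lemma fA_pair (a b : Int) : fA [a, b] = a := rfl
@[simp] lemma fB_pair (a b : Int) : fB [a, b] = b := rfl

lemma row_len2 {r : List Int} (h : r.length = 2) : ∃ a b, r = [a, b] := by
  match r, h with
  | [a, b], _ => exact ⟨a, b, rfl⟩

-- ---- the order produced by sorted2 with key (-x[0], x[1]) ----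
def bLT {α : Type} (k1 k2 : α → Int) (a b : α) : Bool :=
  decide (k1 a < k1 b) || (!decide (k1 b < k1 a) && decide (k2 a < k2 b))

lemma bLT_iff {α : Type} (k1 k2 : α → Int) (a b : α) :
    bLT k1 k2 a b = true ↔ (k1 a < k1 b ∨ (k1 a = k1 b ∧ k2 a < k2 b)) := by
  simp [bLT]; omega

lemma bLT_asymm {α : Type} (k1 k2 : α → Int) {a b : α}
    (h : bLT k1 k2 a b = true) : bLT k1 k2 b a = false := by
  rw [bLT_iff] at h
  rw [Bool.eq_false_iff, Ne, bLT_iff]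
  omega

lemma bLT_trans' {α : Type} (k1 k2 : α → Int) {x y z : α}
    (h1 : bLT k1 k2 x y = true) (h2 : bLT k1 k2 z y = false) : bLT k1 k2 z x = false := by
  rw [bLT_iff] at h1
  rw [Bool.eq_false_iff, Ne, bLT_iff] at h2 ⊢
  omega

lemma sorted2_eq_foldl {α : Type} (xs : List α) (k1 k2 : α → Int) :
    PySem.List.sorted2 xs k1 k2 false =
      xs.foldl (fun acc x => PySem.List.insertBy (bLT k1 k2) x acc) [] := rfl

lemma insertBy_pairwise_bLT {α : Type} (k1 k2 : α → Int) (x : α) (ys : List α)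
    (h : ys.Pairwise (fun a b => bLT k1 k2 b a = false)) :
    (PySem.List.insertBy (bLT k1 k2) x ys).Pairwise (fun a b => bLT k1 k2 b a = false) := by
  induction ys with
  | nil => exact List.pairwise_singleton ..
  | cons y ys ih =>
    rcases List.pairwise_cons.mp h with ⟨hy, hys⟩
    rw [show PySem.List.insertBy (bLT k1 k2) x (y :: ys) =
      if bLT k1 k2 x y then x :: y :: ys else y :: PySem.List.insertBy (bLT k1 k2) x ys from rfl]
    by_cases hxy : bLT k1 k2 x y = true
    · rw [if_pos hxy]
      refine List.pairwise_cons.mpr ⟨?_, h⟩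
      intro a ha
      rcases List.mem_cons.mp ha with rfl | ha
      · exact bLT_asymm _ _ hxy
      · exact bLT_trans' _ _ hxy (hy a ha)
    · rw [if_neg hxy]
      refine List.pairwise_cons.mpr ⟨?_, ih hys⟩
      intro w hw
      rcases (PySem.List.insertBy_mem_iff _ _ _ _).mp hw with rfl | hw
      · exact Bool.eq_false_iff.mpr hxy
      · exact hy w hw

lemma sorted2_pairwise_bLT {α : Type} (xs : List α) (k1 k2 : α → Int) :
    (PySem.List.sorted2 xs k1 k2 false).Pairwise (fun a b => bLT k1 k2 b a = false) := by
  rw [sorted2_eq_foldl]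
  have h : ∀ (l : List α) (acc : List α),
      acc.Pairwise (fun a b => bLT k1 k2 b a = false) →
      (l.foldl (fun acc x => PySem.List.insertBy (bLT k1 k2) x acc) acc).Pairwise
        (fun a b => bLT k1 k2 b a = false) := by
    intro l
    induction l with
    | nil => intro acc hacc; exact hacc
    | cons z l ih => intro acc hacc; exact ih _ (insertBy_pairwise_bLT _ _ _ _ hacc)
  exact h xs [] List.Pairwise.nil

lemma pyGetD_one (xs : List Int) (d : Int) : PySem.List.pyGetD xs 1 d = xs.getD 1 d := by
  simp [pysem]

lemma sorted_order (scores : List (List Int)) :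
    (PySem.List.sorted2 scores (fun x => -(PySem.List.pyGetD x 0 0))
        (fun x => PySem.List.pyGetD x 1 0)).Pairwise
      (fun p q => fA q ≤ fA p ∧ (fA p = fA q → fB p ≤ fB q)) := by
  refine (sorted2_pairwise_bLT scores _ _).imp ?_
  intro p q hpq
  rw [Bool.eq_false_iff, Ne, bLT_iff] at hpq
  simp only [PySem.List.pyGetD_zero, pyGetD_one] at hpq
  unfold fA fB
  omega

-- ---- characterising A's loop ----
-- Bool test: is row r strictly dominated by some row of S?
def domS (S : List (List Int)) (r : List Int) : Bool :=
  S.any fun q => decide (fA r < fA q) && decide (fB r < fB q)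

lemma domS_eq_true {S : List (List Int)} {r : List Int} :
    domS S r = true ↔ ∃ q ∈ S, fA r < fA q ∧ fB r < fB q := by
  simp [domS]

lemma domS_eq_false {S : List (List Int)} {r : List Int} :
    domS S r = false ↔ ∀ q ∈ S, ¬(fA r < fA q ∧ fB r < fB q) := by
  simp only [domS, List.any_eq_false, Bool.and_eq_true, decide_eq_true_eq]

-- the counting predicate of A's loop
def Pcnt (S : List (List Int)) (check s : Int) (r : List Int) : Bool :=
  decide (check ≤ fB r) && !(domS S r) && decide (fA r + fB r > s)

lemma Pcnt_iff (S : List (List Int)) (check s : Int) (r : List Int) :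
    Pcnt S check s r = true ↔ (check ≤ fB r ∧ domS S r = false ∧ fA r + fB r > s) := by
  simp only [Pcnt, Bool.and_eq_true, Bool.not_eq_true', decide_eq_true_eq]
  tauto

lemma loopA_neg (w0 w1 s : Int) :
    ∀ (S : List (List Int)) (check answer : Int),
      (∀ r ∈ S, r.length = 2) →
      (∃ r ∈ S, w0 < fA r ∧ w1 < fB r) →
      solGoA w0 w1 s check answer S = -1 := by
  intro S
  induction S with
  | nil => intro check answer _ hdom; simp at hdom
  | cons r T ih =>
    intro check answer h2 hdom
    obtain ⟨a, b, rfl⟩ := row_len2 (h2 r (List.mem_cons_self ..))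
    by_cases hd : w0 < a ∧ w1 < b
    · simp [solGoA, hd]
    · have hdomT : ∃ r ∈ T, w0 < fA r ∧ w1 < fB r := by
        rcases hdom with ⟨r', hr', hx⟩
        rcases List.mem_cons.mp hr' with rfl | hr'
        · exact absurd hx (by simpa [fA, fB] using hd)
        · exact ⟨r', hr', hx⟩
      have h2T : ∀ r ∈ T, r.length = 2 := fun r hr => h2 r (List.mem_cons_of_mem _ hr)
      by_cases hc : check ≤ b
      · simp only [solGoA, if_neg hd, if_pos hc]
        exact ih _ _ h2T hdomT
      · simp only [solGoA, if_neg hd, if_neg hc]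
        exact ih _ _ h2T hdomT

lemma loopA_count (w0 w1 s : Int) :
    ∀ (S : List (List Int)),
      (∀ r ∈ S, r.length = 2) →
      (∀ r ∈ S, ¬(w0 < fA r ∧ w1 < fB r)) →
      S.Pairwise (fun p q => fA q ≤ fA p ∧ (fA p = fA q → fB p ≤ fB q)) →
      ∀ (check answer : Int),
      solGoA w0 w1 s check answer S =
        answer + (S.countP (Pcnt S check s) : Int) := by
  intro S
  induction S with
  | nil => intro _ _ _ check answer; simp [solGoA]
  | cons r T ih =>
    intro h2 hnd hpw check answer
    obtain ⟨a, b, rfl⟩ := row_len2 (h2 r (List.mem_cons_self ..))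
    rcases List.pairwise_cons.mp hpw with ⟨hord, hpwT⟩
    have h2T : ∀ r ∈ T, r.length = 2 := fun r hr => h2 r (List.mem_cons_of_mem _ hr)
    have hndT : ∀ r ∈ T, ¬(w0 < fA r ∧ w1 < fB r) := fun r hr => hnd r (List.mem_cons_of_mem _ hr)
    have hd : ¬(w0 < a ∧ w1 < b) := by simpa using hnd _ (List.mem_cons_self ..)
    have hord' : ∀ q ∈ T, fA q ≤ a ∧ (a = fA q → b ≤ fB q) := by
      intro q hq; simpa using hord q hq
    have hself : domS ([a, b] :: T) [a, b] = false := by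
      rw [domS_eq_false]
      intro q hq
      rcases List.mem_cons.mp hq with rfl | hq
      · simp
      · have h5 := (hord' q hq).1
        simp only [fA_pair, fB_pair]
        omega
    by_cases hc : check ≤ b
    · simp only [solGoA, if_neg hd, if_pos hc]
      rw [ih h2T hndT hpwT]
      have hcongr : T.countP (Pcnt ([a, b] :: T) check s) = T.countP (Pcnt T b s) := by
        apply List.countP_congr
        intro q hq
        obtain ⟨x, y, rfl⟩ := row_len2 (h2T q hq)
        have hxy := hord' _ hq
        simp only [fA_pair, fB_pair] at hxy
        rw [Pcnt_iff, Pcnt_iff]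
        simp only [domS, List.any_cons, Bool.or_eq_false_iff, fA_pair, fB_pair,
          Bool.and_eq_false_iff, decide_eq_false_iff_not]
        constructor
        · rintro ⟨hcy, ⟨hD, ht⟩, hs'⟩
          refine ⟨?_, ht, hs'⟩
          rcases hD with h | h
          · exact hxy.2 (by omega)
          · omega
        · rintro ⟨hby, ht, hs'⟩
          exact ⟨by omega, ⟨Or.inr (by omega), ht⟩, hs'⟩
      rw [List.countP_cons, hcongr]
      have hhead : (Pcnt ([a, b] :: T) check s [a, b] = true) ↔ (a + b > s) := by
        rw [Pcnt_iff]
        simp only [fA_pair, fB_pair, hself]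
        constructor
        · rintro ⟨_, _, h⟩; exact h
        · intro h; exact ⟨hc, trivial, h⟩
      simp only [hhead]
      by_cases hs : a + b > s
      · rw [if_pos hs, if_pos hs]; push_cast; ring
      · rw [if_neg hs, if_neg hs]; push_cast; ring
    · simp only [solGoA, if_neg hd, if_neg hc]
      rw [ih h2T hndT hpwT]
      have hcongr : T.countP (Pcnt ([a, b] :: T) check s) = T.countP (Pcnt T check s) := by
        apply List.countP_congr
        intro q hq
        obtain ⟨x, y, rfl⟩ := row_len2 (h2T q hq)
        rw [Pcnt_iff, Pcnt_iff]
        simp only [domS, List.any_cons, Bool.or_eq_false_iff, fA_pair, fB_pair,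
          Bool.and_eq_false_iff, decide_eq_false_iff_not]
        constructor
        · rintro ⟨h1, ⟨_, ht⟩, hs'⟩
          exact ⟨h1, ht, hs'⟩
        · rintro ⟨h1, ht, hs'⟩
          exact ⟨h1, ⟨Or.inr (by omega), ht⟩, hs'⟩
      rw [List.countP_cons, hcongr]
      have hhead : ¬(Pcnt ([a, b] :: T) check s [a, b] = true) := by
        rw [Pcnt_iff]
        rintro ⟨h1, _⟩
        exact hc (by simpa using h1)
      rw [if_neg hhead]
      push_cast; ring

-- ---- bridges from the two ports to canonical counts over the original list ----
def QB (scores : List (List Int)) (s : Int) (r : List Int) : Bool :=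
  decide (fA r + fB r > s) && !(domS scores r)

lemma QB_iff (scores : List (List Int)) (s : Int) (r : List Int) :
    QB scores s r = true ↔ (fA r + fB r > s ∧ domS scores r = false) := by
  simp only [QB, Bool.and_eq_true, Bool.not_eq_true', decide_eq_true_eq]

lemma domInAlt_eq_domS (scores : List (List Int)) (h2 : ∀ r ∈ scores, r.length = 2)
    (a b : Int) : domInAlt scores a b = domS scores [a, b] := by
  unfold domInAlt domS
  apply PySem.List.any_congr_mem
  intro q hq
  obtain ⟨x, y, rfl⟩ := row_len2 (h2 q hq)
  rfl

lemma bridgeA (a0 b0 : Int) (rest : List (List Int))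
    (h2 : ∀ r ∈ ([a0, b0] :: rest : List (List Int)), r.length = 2)
    (hnd : ∀ r ∈ ([a0, b0] :: rest : List (List Int)), ¬(a0 < fA r ∧ b0 < fB r)) :
    solution ([a0, b0] :: rest) =
      1 + (([a0, b0] :: rest).countP (Pcnt ([a0, b0] :: rest) 0 (a0 + b0)) : Int) := by
  have hperm := PySem.List.sorted2_perm ([a0, b0] :: rest)
    (fun x => -(PySem.List.pyGetD x 0 0)) (fun x => PySem.List.pyGetD x 1 0) false
  have h2S : ∀ r ∈ (PySem.List.sorted2 ([a0, b0] :: rest)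
      (fun x => -(PySem.List.pyGetD x 0 0)) (fun x => PySem.List.pyGetD x 1 0)), r.length = 2 :=
    fun r hr => h2 r (hperm.mem_iff.mp hr)
  have hndS : ∀ r ∈ (PySem.List.sorted2 ([a0, b0] :: rest)
      (fun x => -(PySem.List.pyGetD x 0 0)) (fun x => PySem.List.pyGetD x 1 0)),
      ¬(a0 < fA r ∧ b0 < fB r) :=
    fun r hr => hnd r (hperm.mem_iff.mp hr)
  have e1 : PySem.List.pyGetD ([a0, b0] : List Int) 0 0 = a0 := rfl
  have e2 : PySem.List.pyGetD ([a0, b0] : List Int) 1 0 = b0 := rfl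
  have e3 : ([a0, b0] : List Int).sum = a0 + b0 := by simp
  show solGoA (PySem.List.pyGetD ([a0, b0] : List Int) 0 0)
      (PySem.List.pyGetD ([a0, b0] : List Int) 1 0) ([a0, b0] : List Int).sum 0 1 _ =
    1 + _
  rw [e1, e2, e3, loopA_count a0 b0 (a0 + b0) _ h2S hndS (sorted_order _) 0 1]
  congr 1
  have hstep1 : (PySem.List.sorted2 ([a0, b0] :: rest)
        (fun x => -(PySem.List.pyGetD x 0 0)) (fun x => PySem.List.pyGetD x 1 0)).countP
        (Pcnt (PySem.List.sorted2 ([a0, b0] :: rest)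
          (fun x => -(PySem.List.pyGetD x 0 0)) (fun x => PySem.List.pyGetD x 1 0)) 0 (a0 + b0)) =
      (PySem.List.sorted2 ([a0, b0] :: rest)
        (fun x => -(PySem.List.pyGetD x 0 0)) (fun x => PySem.List.pyGetD x 1 0)).countP
        (Pcnt ([a0, b0] :: rest) 0 (a0 + b0)) := by
    apply List.countP_congr
    intro r _
    unfold Pcnt
    rw [show domS (PySem.List.sorted2 ([a0, b0] :: rest)
      (fun x => -(PySem.List.pyGetD x 0 0)) (fun x => PySem.List.pyGetD x 1 0)) r =
      domS ([a0, b0] :: rest) r from hperm.any_eq]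
  rw [hstep1]
  exact_mod_cast congrArg Nat.cast (hperm.countP_eq _)

lemma bridgeB (a0 b0 : Int) (rest : List (List Int))
    (h2 : ∀ r ∈ ([a0, b0] :: rest : List (List Int)), r.length = 2)
    (hnd : ∀ r ∈ ([a0, b0] :: rest : List (List Int)), ¬(a0 < fA r ∧ b0 < fB r)) :
    solution_alt ([a0, b0] :: rest) =
      1 + (([a0, b0] :: rest).countP (QB ([a0, b0] :: rest) (a0 + b0)) : Int) := by
  have hdom : domInAlt ([a0, b0] :: rest) a0 b0 = false := by
    rw [domInAlt_eq_domS _ h2, domS_eq_false]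
    simpa using hnd
  show (if domInAlt ([a0, b0] :: rest) a0 b0 then -1 else
      1 + ((([a0, b0] :: rest).countP (fun r => match r with
        | [a, b] => decide (a + b > a0 + b0) && !(domInAlt ([a0, b0] :: rest) a b)
        | _ => false)) : Int)) = 1 + _
  rw [hdom]
  simp only [Bool.false_eq_true, if_false]
  congr 2
  apply List.countP_congr
  intro r hr
  obtain ⟨x, y, rfl⟩ := row_len2 (h2 r hr)
  show (decide (x + y > a0 + b0) && !(domInAlt ([a0, b0] :: rest) x y)) = true ↔ _
  rw [domInAlt_eq_domS _ h2, QB_iff]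
  simp only [fA_pair, fB_pair, Bool.and_eq_true, Bool.not_eq_true', decide_eq_true_eq]

lemma bridgeNeg (a0 b0 : Int) (rest : List (List Int))
    (h2 : ∀ r ∈ ([a0, b0] :: rest : List (List Int)), r.length = 2)
    (hdom : ∃ r ∈ ([a0, b0] :: rest : List (List Int)), a0 < fA r ∧ b0 < fB r) :
    solution ([a0, b0] :: rest) = -1 ∧ solution_alt ([a0, b0] :: rest) = -1 := by
  have hperm := PySem.List.sorted2_perm ([a0, b0] :: rest)
    (fun x => -(PySem.List.pyGetD x 0 0)) (fun x => PySem.List.pyGetD x 1 0) false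
  constructor
  · have e1 : PySem.List.pyGetD ([a0, b0] : List Int) 0 0 = a0 := rfl
    have e2 : PySem.List.pyGetD ([a0, b0] : List Int) 1 0 = b0 := rfl
    show solGoA (PySem.List.pyGetD ([a0, b0] : List Int) 0 0)
        (PySem.List.pyGetD ([a0, b0] : List Int) 1 0) ([a0, b0] : List Int).sum 0 1 _ = -1
    rw [e1, e2]
    apply loopA_neg
    · exact fun r hr => h2 r (hperm.mem_iff.mp hr)
    · rcases hdom with ⟨r, hr, hx⟩
      exact ⟨r, hperm.mem_iff.mpr hr, hx⟩
  · have hd : domInAlt ([a0, b0] :: rest) a0 b0 = true := by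
      rw [domInAlt_eq_domS _ h2, domS_eq_true]
      simpa using hdom
    show (if domInAlt ([a0, b0] :: rest) a0 b0 then (-1 : Int) else _) = -1
    rw [hd]
    simp

lemma countP_lt_of_witness {α : Type} (p q : α → Bool) (l : List α)
    (h : ∀ x ∈ l, p x = true → q x = true) (x0 : α) (hx0 : x0 ∈ l)
    (hq : q x0 = true) (hp : p x0 = false) : l.countP p < l.countP q := by
  induction l with
  | nil => cases hx0
  | cons y l ih =>
    rw [List.countP_cons, List.countP_cons]
    have hmono : l.countP p ≤ l.countP q :=
      List.countP_mono_left (fun x hx => h x (List.mem_cons_of_mem _ hx))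
    rcases List.mem_cons.mp hx0 with rfl | hx0
    · rw [hp, hq]
      simp only [Bool.false_eq_true, if_false, if_pos]
      omega
    · have hy : (if p y = true then 1 else 0) ≤ (if q y = true then 1 else 0) := by
        by_cases hpy : p y = true
        · rw [if_pos hpy, if_pos (h y (List.mem_cons_self ..) hpy)]
        · rw [if_neg hpy]; omega
      have := ih (fun x hx => h x (List.mem_cons_of_mem _ hx)) hx0
      omega

lemma pvUndom_iff (scores : List (List Int)) (r : List Int) :
    pvUndom scores r = true ↔ ∀ q ∈ scores, ¬(fA r < fA q ∧ fB r < fB q) := by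
  simp only [pvUndom, List.all_eq_true, Bool.not_eq_true', Bool.and_eq_false_iff,
    decide_eq_false_iff_not]
  unfold fA fB
  constructor
  · intro h q hq hx; rcases h q hq with h' | h'
    · exact absurd hx.1 h'
    · exact absurd hx.2 h'
  · intro h q hq
    by_cases h1 : r.getD 0 0 < q.getD 0 0
    · exact Or.inr (fun h2 => h q hq ⟨h1, h2⟩)
    · exact Or.inl h1
-- D_solution restated over the head shape
lemma D_iff (a0 b0 : Int) (rest : List (List Int))
    (h2 : ∀ r ∈ ([a0, b0] :: rest : List (List Int)), r.length = 2) :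
    D_solution ([a0, b0] :: rest) ↔
      ((∀ r ∈ ([a0, b0] :: rest : List (List Int)), ¬(a0 < fA r ∧ b0 < fB r)) ∧
       (∃ r ∈ ([a0, b0] :: rest : List (List Int)), fB r < 0 ∧ fA r + fB r > a0 + b0 ∧
         ∀ q ∈ ([a0, b0] :: rest : List (List Int)), ¬(fA r < fA q ∧ fB r < fB q))) := by
  unfold D_solution
  rw [show (([a0, b0] :: rest).headD []) = [a0, b0] from rfl, pvUndom_iff]
  constructor
  · rintro ⟨h1, r, hr, hneg, hsum, hu⟩
    obtain ⟨x, y, rfl⟩ := row_len2 (h2 r hr)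
    refine ⟨by simpa using h1, [x, y], hr, hneg, ?_, (pvUndom_iff _ _).mp hu⟩
    simp only [fA_pair, fB_pair]
    simp at hsum
    omega
  · rintro ⟨h1, r, hr, hneg, hsum, hu⟩
    obtain ⟨x, y, rfl⟩ := row_len2 (h2 r hr)
    refine ⟨by simpa using h1, [x, y], hr, hneg, ?_, (pvUndom_iff _ _).mpr hu⟩
    simp only [fA_pair, fB_pair] at hsum
    simp
    omega

-- ===== VERDICT (by name: the statement is the Claim_ definition above) =====
theorem solution_spec : Claim_unchanged_solution := by
  intro scores _ hpre hD
  rcases hpre with ⟨hne, h2⟩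
  match scores, hne with
  | r :: rest, _ =>
    obtain ⟨a0, b0, rfl⟩ := row_len2 (h2 r (List.mem_cons_self ..))
    by_cases hdom : ∃ r ∈ ([a0, b0] :: rest : List (List Int)), a0 < fA r ∧ b0 < fB r
    · rcases bridgeNeg a0 b0 rest h2 hdom with ⟨hA, hB⟩
      rw [hA, hB]
    · have hnd : ∀ r ∈ ([a0, b0] :: rest : List (List Int)), ¬(a0 < fA r ∧ b0 < fB r) := by
        intro r hr hx; exact hdom ⟨r, hr, hx⟩
      have hno2 : ¬ ∃ r ∈ ([a0, b0] :: rest : List (List Int)), fB r < 0 ∧ fA r + fB r > a0 + b0 ∧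
          ∀ q ∈ ([a0, b0] :: rest : List (List Int)), ¬(fA r < fA q ∧ fB r < fB q) := by
        intro hex
        exact hD ((D_iff a0 b0 rest h2).mpr ⟨hnd, hex⟩)
      rw [bridgeA a0 b0 rest h2 hnd, bridgeB a0 b0 rest h2 hnd]
      congr 2
      apply List.countP_congr
      intro r hr
      rw [Pcnt_iff, QB_iff]
      constructor
      · rintro ⟨_, hd, hs⟩; exact ⟨hs, hd⟩
      · rintro ⟨hs, hd⟩
        refine ⟨?_, hd, hs⟩
        by_contra hneg
        exact hno2 ⟨r, hr, by omega, hs, domS_eq_false.mp hd⟩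

theorem solution_changed : Claim_changed_solution := by
  unfold Claim_changed_solution; decide

theorem solution_tight : Claim_exact_solution := by
  intro scores _ hpre hD
  rcases hpre with ⟨hne, h2⟩
  match scores, hne with
  | r :: rest, _ =>
    obtain ⟨a0, b0, rfl⟩ := row_len2 (h2 r (List.mem_cons_self ..))
    rcases (D_iff a0 b0 rest h2).mp hD with ⟨hnd, r0, hr0, hneg, hs0, hnd0⟩
    rw [bridgeA a0 b0 rest h2 hnd, bridgeB a0 b0 rest h2 hnd]
    have hlt : ([a0, b0] :: rest).countP (Pcnt ([a0, b0] :: rest) 0 (a0 + b0)) <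
        ([a0, b0] :: rest).countP (QB ([a0, b0] :: rest) (a0 + b0)) := by
      apply countP_lt_of_witness _ _ _ ?_ r0 hr0
      · rw [QB_iff]
        exact ⟨hs0, domS_eq_false.mpr hnd0⟩
      · rw [Bool.eq_false_iff, Ne, Pcnt_iff]
        rintro ⟨h0, _⟩
        omega
      · intro x _ hx
        rcases (Pcnt_iff _ _ _ _).mp hx with ⟨_, hd, hs⟩
        rw [QB_iff]
        exact ⟨hs, hd⟩
    intro heq
    omega
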